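-- pv_equiv track=rewrite | github.com/Ghanashyam-Bhat/CompetitiveProgramming | 25-2-2025/2.py | solution
-- ===== SOURCE A (Python) =====
-- def solution( fish, baits ):
--    fish.sort( reverse=True )
--    baits.sort( reverse=True )
--
--    i = 0
--    j = 0
--
--    k = 0
--    while True:
--       if j==len( baits ) or i==len( fish ):
--          return i
--       if fish[i] > baits[j]:
--          k += 1
--          i += 1
--       else:
--          k = 0
--       k = k%3
--       if k == 0:
--          j += 1
-- ===== SOURCE B (Python) =====
-- def solution(fish, baits):
--     # Like A, sorts both argument lists in place (descending).
--     fish.sort(reverse=True)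
--     baits.sort(reverse=True)
--     asc = fish[::-1]
--     n = len(fish)
--     i = 0
--     for b in baits:
--         # c = number of fish strictly greater than b, by binary search on asc
--         lo, hi = 0, n
--         while lo < hi:
--             mid = (lo + hi) // 2
--             if asc[mid] <= b:
--                 lo = mid + 1
--             else:
--                 hi = mid
--         c = n - lo
--         # this bait's effect in closed form: up to 3 new catches, never past c
--         i = min(i + 3, max(i, c))
--     return i
-- ===== Notes on version B (the rewrite author's own statement) =====
-- stated objective: alternative
-- what changed: Replaces A's fish-pointer scan with a k%3 consecutive-catch counter by a per-bait closed-form update i = min(i+3, max(i, c)) where c, the number of fish greater than the bait, is found by binary search on the ascending fish list; no fish pointer or catch counter remains.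
import Mathlib
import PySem

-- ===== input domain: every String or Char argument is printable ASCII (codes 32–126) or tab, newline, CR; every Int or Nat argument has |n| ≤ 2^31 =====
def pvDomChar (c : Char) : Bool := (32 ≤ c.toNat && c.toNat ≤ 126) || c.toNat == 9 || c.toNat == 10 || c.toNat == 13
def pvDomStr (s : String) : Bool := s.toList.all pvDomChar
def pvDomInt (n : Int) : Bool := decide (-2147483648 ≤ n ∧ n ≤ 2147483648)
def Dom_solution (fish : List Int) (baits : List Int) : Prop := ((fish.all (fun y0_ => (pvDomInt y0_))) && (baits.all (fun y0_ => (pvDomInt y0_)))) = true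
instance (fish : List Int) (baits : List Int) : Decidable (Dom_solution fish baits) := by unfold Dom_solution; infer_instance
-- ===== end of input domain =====

-- B replaces A's fish-pointer scan with a catch counter by a per-bait closed-form update
-- using a binary-search count of fish greater than the bait (objective: alternative).
-- Both Pythons sort their argument lists in place; the equivalence proved here is about the
-- return value (B performs the same mutation).

-- ===== PORT A =====
-- A's `while True` with indices i, j and counter k; the exit test `j==len(baits) or
-- i==len(fish)` is ported as ≥ (equal on every reachable state, makes termination evident).
-- fuel only makes the recursion structural; it starts ≥ the number of loop steps
-- (each step increments i or j, bounded by len fish + len baits) and is never exhausted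
def loopA (sf sb : List Int) (fuel i j k : Nat) : Int :=
  match fuel with
  | 0 => (i : Int)
  | fuel + 1 =>
    if sb.length ≤ j ∨ sf.length ≤ i then (i : Int)
    else if sf.getD i 0 > sb.getD j 0 then
      -- k += 1; i += 1; k = k%3; if k == 0: j += 1
      if (k + 1) % 3 = 0 then loopA sf sb fuel (i+1) (j+1) 0
      else loopA sf sb fuel (i+1) j ((k + 1) % 3)
    else
      -- k = 0; k = k%3; j += 1
      loopA sf sb fuel i (j+1) 0

def solution (fish : List Int) (baits : List Int) : Int :=
  let sf := PySem.List.sorted fish (fun x => x) true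
  let sb := PySem.List.sorted baits (fun x => x) true
  loopA sf sb (sf.length + sb.length + 1) 0 0 0

-- ===== PORT B =====
-- Source B's hand-written binary search: `while lo < hi: mid=(lo+hi)//2; …`
-- fuel only makes the recursion structural; it starts ≥ hi - lo and is never exhausted
def bsearchB (asc : List Int) (b : Int) (fuel lo hi : Nat) : Nat :=
  match fuel with
  | 0 => lo
  | fuel + 1 =>
    if lo < hi then
      let mid := (lo + hi) / 2
      if asc.getD mid 0 ≤ b then bsearchB asc b fuel (mid+1) hi
      else bsearchB asc b fuel lo mid
    else lo

-- per-bait body of Source B's for-loop: c = n - lo; i = min(i+3, max(i, c))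
def stepB (asc : List Int) (i : Nat) (b : Int) : Nat :=
  min (i + 3) (max i (asc.length - bsearchB asc b asc.length 0 asc.length))

def solution_alt (fish : List Int) (baits : List Int) : Int :=
  let sf := PySem.List.sorted fish (fun x => x) true
  let sb := PySem.List.sorted baits (fun x => x) true
  let asc := sf.reverse
  ((sb.foldl (stepB asc) 0 : Nat) : Int)

-- ===== PRECONDITION & SPEC =====
def Spec_solution (fish : List Int) (baits : List Int) (out : Int) : Prop := out = solution_alt fish baits
instance (fish : List Int) (baits : List Int) (out : Int) : Decidable (Spec_solution fish baits out) := by unfold Spec_solution; infer_instance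

-- ===== CLAIM (what is proved, stated in full; the proofs are below) =====
def Claim_equal_solution : Prop := ∀ (fish : List Int) (baits : List Int), Dom_solution fish baits → Spec_solution fish baits (solution fish baits)

-- ===== LEMMAS AND PROOFS =====

-- binary-search invariant: on an index-monotone list, bsearchB returns the boundary
-- between the ≤ b prefix and the > b suffix of [0, n)
lemma bsearchB_spec (asc : List Int) (b : Int)
    (hmono : ∀ p q, p ≤ q → q < asc.length → asc.getD p 0 ≤ asc.getD q 0) :
    ∀ fuel lo hi, hi - lo ≤ fuel → lo ≤ hi → hi ≤ asc.length →
    (∀ p, p < lo → asc.getD p 0 ≤ b) →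
    (∀ p, hi ≤ p → p < asc.length → ¬ asc.getD p 0 ≤ b) →
    (bsearchB asc b fuel lo hi ≤ asc.length ∧
     (∀ p, p < bsearchB asc b fuel lo hi → asc.getD p 0 ≤ b) ∧
     (∀ p, bsearchB asc b fuel lo hi ≤ p → p < asc.length → ¬ asc.getD p 0 ≤ b)) := by
  intro fuel
  induction fuel with
  | zero =>
    intro lo hi hf hlh hhn hlow hhigh
    have : lo = hi := by omega
    show (lo ≤ asc.length ∧ _ ∧ _)
    exact ⟨by omega, hlow, by subst this; exact hhigh⟩
  | succ fuel ih =>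
    intro lo hi hf hlh hhn hlow hhigh
    rw [bsearchB]
    by_cases hlt : lo < hi
    · rw [if_pos hlt]
      by_cases hle : asc.getD ((lo + hi) / 2) 0 ≤ b
      · rw [if_pos hle]
        refine ih ((lo+hi)/2+1) hi (by omega) (by omega) hhn ?_ hhigh
        intro p hp
        by_cases hplo : p < lo
        · exact hlow p hplo
        · exact le_trans (hmono p ((lo+hi)/2) (by omega) (by omega)) hle
      · rw [if_neg hle]
        refine ih lo ((lo+hi)/2) (by omega) (by omega) (by omega) hlow ?_
        intro p hp hpn hcon
        exact hle (le_trans (hmono ((lo+hi)/2) p hp hpn) hcon)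
    · rw [if_neg hlt]
      have : lo = hi := by omega
      exact ⟨by omega, hlow, by subst this; exact hhigh⟩

-- the count c used by stepB: on the reversed (ascending) sorted list, c ≤ n and
-- fish[i] > b iff i < c, where fish is the descending-sorted list
lemma count_spec (sf : List Int) (b : Int)
    (hsorted : sf.Pairwise (fun a c => c ≤ a)) :
    let asc := sf.reverse
    let c := asc.length - bsearchB asc b asc.length 0 asc.length
    c ≤ sf.length ∧ ∀ p, p < sf.length → (sf.getD p 0 > b ↔ p < c) := by
  intro asc c
  have hlen : asc.length = sf.length := sf.length_reverse
  have hmono : ∀ p q, p ≤ q → q < asc.length → asc.getD p 0 ≤ asc.getD q 0 := by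
    intro p q hpq hq
    have hp : p < asc.length := by omega
    rw [List.getD_eq_getElem _ _ hp, List.getD_eq_getElem _ _ hq]
    rw [List.getElem_reverse, List.getElem_reverse]
    have := (List.pairwise_iff_getElem).1 hsorted
      (sf.length - 1 - q) (sf.length - 1 - p) (by omega) (by omega)
    by_cases he : p = q
    · subst he; simp
    · exact this (by omega)
  obtain ⟨hr, hle, hgt⟩ := bsearchB_spec asc b hmono asc.length 0 asc.length
    (by omega) (by omega) (le_refl _) (by omega) (fun p hp hpn => by omega)
  constructor
  · omega
  · intro p hp
    have hrev : sf.getD p 0 = asc.getD (sf.length - 1 - p) 0 := by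
      rw [List.getD_eq_getElem _ _ hp, List.getD_eq_getElem _ _ (by omega)]
      rw [List.getElem_reverse]
      congr 1; omega
    constructor
    · intro hgtb
      by_contra hcon
      have : sf.length - 1 - p < bsearchB asc b asc.length 0 asc.length := by omega
      have := hle _ this
      rw [← hrev] at this; omega
    · intro hpc
      have : bsearchB asc b asc.length 0 asc.length ≤ sf.length - 1 - p := by omega
      have := hgt _ this (by omega)
      rw [← hrev] at this; omega

-- fold over the baits keeps i = n fixed
lemma foldB_of_ge (asc : List Int) (l : List Int) :
    l.foldl (stepB asc) asc.length = asc.length := by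
  induction l with
  | nil => rfl
  | cons b t ih =>
    have : stepB asc asc.length b = asc.length := by
      unfold stepB
      rw [Nat.max_eq_left (Nat.sub_le _ _)]
      exact Nat.min_eq_right (Nat.le_add_right _ _)
    simp [List.foldl, this, ih]

-- Main invariant: A's loop at state (i, j, k) with k consecutive catches on bait j
-- equals B's fold over the remaining baits, the current bait allowing only 3-k more.
lemma loopA_eq (sf sb : List Int) (hsorted : sf.Pairwise (fun a c => c ≤ a)) :
    ∀ fuel i j k, k < 3 → i ≤ sf.length →
      (sf.length - i) + (sb.length - j) < fuel →
    loopA sf sb fuel i j k =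
      if sb.length ≤ j then (i : Int)
      else (((sb.drop (j+1)).foldl (stepB sf.reverse)
              (min (i + (3 - k)) (max i (sf.reverse.length - bsearchB sf.reverse (sb.getD j 0) sf.reverse.length 0 sf.reverse.length))) : Nat) : Int) := by
  intro fuel
  induction fuel with
  | zero =>
    intro i j k hk hi hm
    exact absurd hm (by omega)
  | succ fuel ih =>
    intro i j k hk hi hm
    have hlen : sf.reverse.length = sf.length := sf.length_reverse
    rw [loopA]
    by_cases hj : sb.length ≤ j
    · rw [if_pos (Or.inl hj), if_pos hj]
    · rw [if_neg hj]
      obtain ⟨hc, hiff⟩ := count_spec sf (sb.getD j 0) hsorted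
      set c := sf.reverse.length - bsearchB sf.reverse (sb.getD j 0) sf.reverse.length 0 sf.reverse.length with hcdef
      have hcn : c ≤ sf.length := hc
      have hdrop : sb.drop j = sb.getD j 0 :: sb.drop (j+1) := by
        rw [List.getD_eq_getElem _ _ (by omega)]
        exact List.drop_eq_getElem_cons (by omega)
      by_cases hin : sf.length ≤ i
      · rw [if_pos (Or.inr hin)]
        have hieq : i = sf.length := by omega
        have : min (i + (3 - k)) (max i c) = sf.length := by
          rw [Nat.max_eq_left (by omega : c ≤ i)]
          rw [Nat.min_eq_right (Nat.le_add_right _ _)]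
          exact hieq
        rw [this, hieq, ← hlen, foldB_of_ge]
      · rw [if_neg (by push_neg; exact ⟨by omega, by omega⟩)]
        have hiffi := hiff i (by omega)
        by_cases hcatch : sf.getD i 0 > sb.getD j 0
        · rw [if_pos hcatch]
          have hic : i < c := hiffi.1 hcatch
          by_cases h3 : (k + 1) % 3 = 0
          · -- third consecutive catch (k = 2): bait j is done with i+1 fish caught
            have hk2 : k = 2 := by omega
            rw [if_pos h3, ih (i+1) (j+1) 0 (by omega) (by omega) (by omega)]
            have hcur : min (i + (3 - k)) (max i c) = i + 1 := by
              rw [Nat.max_eq_right (Nat.le_of_lt hic), Nat.min_eq_left (by omega : i + (3 - k) ≤ c)]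
              omega
            rw [hcur]
            by_cases hj1 : sb.length ≤ j + 1
            · rw [if_pos hj1]
              have : sb.drop (j+1) = [] := List.drop_eq_nil_of_le hj1
              rw [this, List.foldl_nil]
            · rw [if_neg hj1]
              have hdrop1 : sb.drop (j+1) = sb.getD (j+1) 0 :: sb.drop (j+2) := by
                rw [List.getD_eq_getElem _ _ (by omega)]
                exact List.drop_eq_getElem_cons (by omega)
              rw [hdrop1, List.foldl_cons]
              rfl
          · -- catch with k+1 < 3: same bait continues
            have hmod : (k + 1) % 3 = k + 1 := Nat.mod_eq_of_lt (by omega)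
            rw [if_neg h3, hmod, ih (i+1) j (k+1) (by omega) (by omega) (by omega),
                if_neg hj]
            have : min (i + 1 + (3 - (k+1))) (max (i+1) c) = min (i + (3 - k)) (max i c) := by
              rw [Nat.max_eq_right hic, Nat.max_eq_right (Nat.le_of_lt hic)]
              congr 1
              omega
            rw [this]
        · -- miss: bait j advances with i unchanged
          rw [if_neg hcatch]
          have hci : c ≤ i := by
            by_contra hcon
            exact hcatch (hiffi.2 (by omega))
          rw [ih i (j+1) 0 (by omega) (by omega) (by omega)]
          have hcur : min (i + (3 - k)) (max i c) = i := by
            rw [Nat.max_eq_left hci]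
            exact Nat.min_eq_right (Nat.le_add_right _ _)
          rw [hcur]
          by_cases hj1 : sb.length ≤ j + 1
          · rw [if_pos hj1]
            have : sb.drop (j+1) = [] := List.drop_eq_nil_of_le hj1
            rw [this, List.foldl_nil]
          · rw [if_neg hj1]
            have hdrop1 : sb.drop (j+1) = sb.getD (j+1) 0 :: sb.drop (j+2) := by
              rw [List.getD_eq_getElem _ _ (by omega)]
              exact List.drop_eq_getElem_cons (by omega)
            rw [hdrop1, List.foldl_cons]
            rfl

-- ===== VERDICT (by name: the statement is the Claim_ definition above) =====
theorem solution_spec : Claim_equal_solution := by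
  intro fish baits _
  show loopA (PySem.List.sorted fish (fun x => x) true) (PySem.List.sorted baits (fun x => x) true)
        ((PySem.List.sorted fish (fun x => x) true).length + (PySem.List.sorted baits (fun x => x) true).length + 1) 0 0 0
     = (((((PySem.List.sorted baits (fun x => x) true)).foldl (stepB (PySem.List.sorted fish (fun x => x) true).reverse) 0 : Nat) : Int))
  set sf := PySem.List.sorted fish (fun x => x) true with hsf
  set sb := PySem.List.sorted baits (fun x => x) true with hsb
  have hsorted : sf.Pairwise (fun a c => c ≤ a) := PySem.List.sorted_pairwise_rev fish (fun x => x)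
  rw [loopA_eq sf sb hsorted (sf.length + sb.length + 1) 0 0 0 (by omega) (by omega) (by omega)]
  by_cases hm : sb.length ≤ 0
  · rw [if_pos hm]
    have : sb = [] := List.length_eq_zero_iff.1 (by omega)
    rw [this]
    rfl
  · rw [if_neg hm]
    have h0 : sb = sb.getD 0 0 :: sb.drop 1 := by
      rw [List.getD_eq_getElem _ _ (by omega)]
      have hd := List.drop_eq_getElem_cons (l := sb) (i := 0) (by omega)
      simpa using hd
    conv_rhs => rw [h0]
    rw [List.foldl_cons]
    congr 2
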